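-- pv_equiv track=rewrite | github.com/jonzeper/advent-of-code | 2024/python/solutions/07.py | could_be_valid
-- ===== SOURCE A (Python) =====
-- def could_be_valid(test_value, cur_value, operands) -> bool:
--     if cur_value > test_value:
--         return False
--     next_operand = operands[0]
--     if len(operands) == 1:
--         return cur_value + next_operand == test_value or cur_value * next_operand == test_value
--     else:
--         return could_be_valid(test_value, cur_value + next_operand, operands[1:]) or could_be_valid(test_value, cur_value * next_operand, operands[1:])
-- ===== SOURCE B (Python) =====
-- def could_be_valid(test_value, cur_value, operands) -> bool:
--     # Iterative breadth-first pass: maintain the set of surviving partial values.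
--     survivors = {cur_value}
--     for op in operands[:-1]:
--         survivors = {v + op for v in survivors if v <= test_value} | \
--                     {v * op for v in survivors if v <= test_value}
--     last = operands[-1]
--     return any(v <= test_value and (v + last == test_value or v * last == test_value)
--                for v in survivors)
-- ===== Notes on version B (the rewrite author's own statement) =====
-- stated objective: alternative
-- what changed: Replaces the binary recursion over suffixes by a single iterative level-by-level pass maintaining a deduplicated set of surviving partial values, with the strict '> test_value' prune applied as a filter at each level.
-- outside the precondition, e.g. on could_be_valid(0, 5, []): A returns False, B raises IndexError
import Mathlib
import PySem

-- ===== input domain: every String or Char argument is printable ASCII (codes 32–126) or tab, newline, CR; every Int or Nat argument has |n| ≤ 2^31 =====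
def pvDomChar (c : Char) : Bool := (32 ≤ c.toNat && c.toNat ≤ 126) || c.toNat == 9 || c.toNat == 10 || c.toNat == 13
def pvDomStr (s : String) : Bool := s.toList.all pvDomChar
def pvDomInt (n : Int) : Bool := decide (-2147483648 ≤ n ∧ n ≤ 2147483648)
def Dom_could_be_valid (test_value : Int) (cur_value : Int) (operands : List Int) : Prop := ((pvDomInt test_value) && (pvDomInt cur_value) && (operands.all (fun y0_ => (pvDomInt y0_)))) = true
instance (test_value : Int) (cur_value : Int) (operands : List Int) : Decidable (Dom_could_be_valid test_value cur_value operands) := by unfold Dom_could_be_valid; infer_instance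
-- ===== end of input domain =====

-- B replaces A's binary recursion by an iterative level-by-level pass over a set of
-- surviving partial values (alternative decomposition; dedup is safe for the existential OR).
-- Pre_ excludes the empty operand list: there A raises IndexError on operands[0] unless
-- cur_value > test_value already made its prune return False, an artefact of the check
-- order, while B unconditionally indexes operands[-1] and raises.


-- ===== PORT A =====
def could_be_valid (test_value : Int) (cur_value : Int) (operands : List Int) : Bool :=
  if cur_value > test_value then false
  else
    match operands with
    | [] => false            -- operands[0] raises IndexError here (excluded by Pre_)
    | next_operand :: rest =>
      if rest.isEmpty then   -- len(operands) == 1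
        (cur_value + next_operand == test_value || cur_value * next_operand == test_value)
      else                   -- operands[1:] = rest
        could_be_valid test_value (cur_value + next_operand) rest ||
        could_be_valid test_value (cur_value * next_operand) rest

-- ===== PORT B =====
-- one loop body: {v + op for v in survivors if v <= tv} | {v * op for v in survivors if v <= tv}
def altStep (test_value : Int) (survivors : PySem.Set Int) (op : Int) : PySem.Set Int :=
  PySem.Set.union
    (PySem.Set.ofList ((survivors.filter (· ≤ test_value)).map (· + op)))
    ((survivors.filter (· ≤ test_value)).map (· * op))

def could_be_valid_alt (test_value : Int) (cur_value : Int) (operands : List Int) : Bool :=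
  -- operands[:-1] is exactly operands.dropLast
  let survivors := operands.dropLast.foldl (altStep test_value) (PySem.Set.ofList [cur_value])
  match PySem.List.pyGet? operands (-1) with  -- operands[-1]
  | none => false            -- IndexError on empty operands (excluded by Pre_)
  | some last =>
    survivors.any (fun v =>
      v ≤ test_value && (v + last == test_value || v * last == test_value))

-- ===== PRECONDITION & SPEC =====
-- Pre_ excludes empty operand lists: A raises IndexError there except when
-- cur_value > test_value (where its early False is an artefact of check order); B raises on all of them.
def Pre_could_be_valid (test_value : Int) (cur_value : Int) (operands : List Int) : Prop :=
  operands ≠ []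
instance (test_value : Int) (cur_value : Int) (operands : List Int) : Decidable (Pre_could_be_valid test_value cur_value operands) := by unfold Pre_could_be_valid; infer_instance
def pvWitness_could_be_valid : Int × Int × List Int := (190, 0, [10, 19])

def Spec_could_be_valid (test_value : Int) (cur_value : Int) (operands : List Int) (out : Bool) : Prop := out = could_be_valid_alt test_value cur_value operands
instance (test_value : Int) (cur_value : Int) (operands : List Int) (out : Bool) : Decidable (Spec_could_be_valid test_value cur_value operands out) := by unfold Spec_could_be_valid; infer_instance

-- ===== CLAIM (what is proved, stated in full; the proofs are below) =====
def Claim_equal_could_be_valid : Prop := ∀ (test_value : Int) (cur_value : Int) (operands : List Int), Dom_could_be_valid test_value cur_value operands → Pre_could_be_valid test_value cur_value operands → Spec_could_be_valid test_value cur_value operands (could_be_valid test_value cur_value operands)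

-- ===== LEMMAS AND PROOFS =====

-- the last-level check of B equals A's single-operand case
lemma check_eq_base (tv v last : Int) :
    (decide (v ≤ tv) && (v + last == tv || v * last == tv)) = could_be_valid tv v [last] := by
  unfold could_be_valid
  by_cases h : v > tv <;> simp [h] <;> omega

lemma mem_altStep (tv op x : Int) (s : List Int) :
    x ∈ altStep tv s op ↔ ∃ v ∈ s, v ≤ tv ∧ (x = v + op ∨ x = v * op) := by
  unfold altStep
  simp only [PySem.Set.mem_union, PySem.Set.mem_ofList, List.mem_map, List.mem_filter,
    decide_eq_true_eq]
  constructor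
  · rintro (⟨v, ⟨hv, hle⟩, rfl⟩ | ⟨v, ⟨hv, hle⟩, rfl⟩)
    · exact ⟨v, hv, hle, Or.inl rfl⟩
    · exact ⟨v, hv, hle, Or.inr rfl⟩
  · rintro ⟨v, hv, hle, (rfl | rfl)⟩
    · exact Or.inl ⟨v, ⟨hv, hle⟩, rfl⟩
    · exact Or.inr ⟨v, ⟨hv, hle⟩, rfl⟩

-- one unfolding of A on a list of length ≥ 2
lemma step_eq (tv v op : Int) (rest : List Int) (h : rest ≠ []) :
    could_be_valid tv v (op :: rest) =
      (decide (v ≤ tv) &&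
        (could_be_valid tv (v + op) rest || could_be_valid tv (v * op) rest)) := by
  rw [could_be_valid]
  have hne : rest.isEmpty = false := by simpa using h
  by_cases hv : v > tv
  · simp [hv, show ¬ v ≤ tv by omega]
  · simp [hv, show v ≤ tv by omega, hne]

-- main invariant: the breadth-first pass over init computes the existential of A over init ++ [last]
lemma main_inv (tv last : Int) :
    ∀ (init : List Int) (s : List Int),
      (init.foldl (altStep tv) s).any
          (fun v => v ≤ tv && (v + last == tv || v * last == tv))
        = s.any (fun v => could_be_valid tv v (init ++ [last])) := by
  intro init
  induction init with
  | nil =>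
    intro s
    simp only [List.foldl_nil, List.nil_append]
    exact PySem.List.any_congr_mem (fun x _ => check_eq_base tv x last)
  | cons op init' ih =>
    intro s
    have hne : init' ++ [last] ≠ [] := by simp
    simp only [List.foldl_cons, List.cons_append]
    rw [ih (altStep tv s op)]
    rw [PySem.List.any_congr_mem
      (g := fun v => decide (v ≤ tv) &&
        (could_be_valid tv (v + op) (init' ++ [last]) ||
         could_be_valid tv (v * op) (init' ++ [last])))
      (fun v _ => step_eq tv v op _ hne)]
    rw [Bool.eq_iff_iff]
    simp only [List.any_eq_true, Bool.and_eq_true, Bool.or_eq_true, decide_eq_true_eq]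
    constructor
    · rintro ⟨x, hx, hp⟩
      obtain ⟨v, hv, hle, hx2⟩ := (mem_altStep tv op x s).mp hx
      rcases hx2 with rfl | rfl
      · exact ⟨v, hv, hle, Or.inl hp⟩
      · exact ⟨v, hv, hle, Or.inr hp⟩
    · rintro ⟨v, hv, hle, hp | hp⟩
      · exact ⟨v + op, (mem_altStep tv op _ s).mpr ⟨v, hv, hle, Or.inl rfl⟩, hp⟩
      · exact ⟨v * op, (mem_altStep tv op _ s).mpr ⟨v, hv, hle, Or.inr rfl⟩, hp⟩

lemma ofList_singleton (cv : Int) : PySem.Set.ofList [cv] = [cv] := by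
  simp [PySem.Set.ofList, PySem.Set.add, PySem.Set.empty, PySem.Set.contains]

-- ===== VERDICT (by name: the statement is the Claim_ definition above) =====
theorem could_be_valid_spec : Claim_equal_could_be_valid := by
  intro tv cv ops _ hpre
  unfold Spec_could_be_valid
  rcases List.eq_nil_or_concat ops with rfl | ⟨init, last, rfl⟩
  · exact absurd rfl hpre
  · unfold could_be_valid_alt
    rw [List.concat_eq_append]
    have hd : (init ++ [last]).dropLast = init := by simp
    simp only [PySem.List.pyGet?_neg_one_append_singleton, hd, ofList_singleton,
      main_inv tv last init [cv]]
    simp
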